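-- pv_equiv track=rewrite | github.com/chirag127/adblock | scripts/maintain.py | _robust_sort
-- ===== SOURCE A (Python) =====
-- def _is_payload(line):
--     line = line.strip()
--     if not line.startswith('!'):
--         return True
--     # It starts with '!'
--     # Check for rule signatures
--     if any(x in line for x in ['##', '#$#', '#@#', '#%#', '#?#', '||']):
--         return True
--     # Check for 'http'
--     if 'http:' in line or 'https:' in line:
--         # Careful with comments containing links "See https://..."
--         # If ' ' is before 'http', likely comment.
--         # If '!http...' or '!|http...', rule.
--         # Let's check space.
--         if ' ' not in line.split('http')[0]:
--             return True
--     return False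
--
-- def _robust_sort(lines):
--     header_lines = []
--     blocks = []
--     pending_comments = []
--
--     is_header_phase = True
--
--     for line in lines:
--         stripped = line.strip()
--         if not stripped:
--             continue
--
--         # Header Phase detection
--         if is_header_phase:
--             if stripped.startswith('!'):
--                 # Check if it's a rule-like comment
--                 if _is_payload(line):
--                     is_header_phase = False
--                     # This is a payload, proceed to block processing
--                 else:
--                     # It's a header comment
--                     header_lines.append(line)
--                     continue
--             else:
--                 is_header_phase = False
--
--         # Block Processing Phase
--         if not is_header_phase:
--             if _is_payload(line):
--                 # Create block with pending comments + this line
--                 # Key for sorting: the payload line itself (normalized)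
--                 block_content = pending_comments + [line]
--                 blocks.append({'sort_key': stripped.lower(), 'lines': block_content})
--                 pending_comments = []
--             else:
--                 # It's a comment
--                 pending_comments.append(line)
--
--     # Handle trailing comments
--     if pending_comments:
--         # Append to the last block or create a dummy block?
--         # If we create dummy block, what is sort key?
--         # Maybe sort key is the comment itself.
--         blocks.append({'sort_key': pending_comments[0].strip().lower(), 'lines': pending_comments})
--
--     # Sort blocks
--     # Remove duplicates?
--     # If blocks are identical (same comments + same rule), dedupe.
--     # We need a hashable representation.
--
--     unique_blocks = []
--     seen = set()
--
--     # Sort first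
--     sorted_blocks = sorted(blocks, key=lambda x: x['sort_key'])
--
--     for block in sorted_blocks:
--         # content tuple for deduping
--         content_tuple = tuple(block['lines'])
--         if content_tuple not in seen:
--             seen.add(content_tuple)
--             unique_blocks.append(block)
--
--     # Reconstruct
--     final_lines = header_lines[:]
--     for block in unique_blocks:
--         final_lines.extend(block['lines'])
--
--     # Write back
--     return final_lines
-- ===== SOURCE B (Python) =====
-- def _is_payload(line):
--     line = line.strip()
--     if not line.startswith('!'):
--         return True
--     if any(x in line for x in ['##', '#$#', '#@#', '#%#', '#?#', '||']):
--         return True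
--     if 'http:' in line or 'https:' in line:
--         if ' ' not in line.split('http')[0]:
--             return True
--     return False
--
-- def _robust_sort(lines):
--     nonblank = [l for l in lines if l.strip()]
--
--     # header = longest prefix of non-payload '!' comments
--     k = 0
--     while k < len(nonblank) and nonblank[k].strip().startswith('!') and not _is_payload(nonblank[k]):
--         k += 1
--     header, rest = nonblank[:k], nonblank[k:]
--
--     # Chunk the body by a single RIGHT-TO-LEFT scan: each payload line starts a
--     # new chunk (it is the chunk's last line); comments attach to the chunk below.
--     rev_chunks = []
--     cur = []
--     for l in reversed(rest):
--         if _is_payload(l):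
--             if cur:
--                 rev_chunks.append(cur)
--             cur = [l]
--         else:
--             cur.append(l)
--     if cur:
--         rev_chunks.append(cur)
--     chunks = [tuple(reversed(c)) for c in reversed(rev_chunks)]
--
--     # Dedupe FIRST (identical chunks always carry identical sort keys, and the
--     # sort is stable, so deduping before sorting keeps the same survivors),
--     # then stable-sort by the key read off the chunk itself.
--     def key(c):
--         anchor = c[-1] if _is_payload(c[-1]) else c[0]
--         return anchor.strip().lower()
--
--     out = header
--     for c in sorted(dict.fromkeys(chunks), key=key):
--         out.extend(c)
--     return out
-- ===== Notes on version B (the rewrite author's own statement) =====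
-- stated objective: alternative
-- what changed: B drops A's is_header_phase/pending-comments forward state machine: it splits off the header prefix, chunks the body with a single right-to-left scan in which each payload line opens the chunk it terminates, dedupes the chunks first via dict.fromkeys, and only then stable-sorts them by a key read off each chunk (valid because identical chunks carry identical keys, so dedupe-before-sort keeps the same survivors as A's sort-then-dedupe).
import Mathlib
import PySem

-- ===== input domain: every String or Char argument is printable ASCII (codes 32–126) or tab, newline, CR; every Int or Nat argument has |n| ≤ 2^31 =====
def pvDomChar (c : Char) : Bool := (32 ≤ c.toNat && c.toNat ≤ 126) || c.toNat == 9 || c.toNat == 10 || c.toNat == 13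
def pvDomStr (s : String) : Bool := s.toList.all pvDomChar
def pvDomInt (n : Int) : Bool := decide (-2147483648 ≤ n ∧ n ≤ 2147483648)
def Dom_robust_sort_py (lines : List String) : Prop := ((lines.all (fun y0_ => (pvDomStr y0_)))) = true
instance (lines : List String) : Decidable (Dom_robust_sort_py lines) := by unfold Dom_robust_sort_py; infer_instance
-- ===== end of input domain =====

-- B replaces A's single forward loop (is_header_phase flag + pending-comments accumulator) by a
-- right-to-left scan that chunks the body, dedupes the chunks BEFORE the stable sort (dict.fromkeys)
-- and reads each chunk's sort key off the chunk itself; objective: alternative, same cost.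

-- ===== PORT A =====
-- _is_payload, the helper both Python versions share verbatim.
def pvIsPayload (line : String) : Bool :=
  let line := PySem.Str.strip line
  if !(PySem.Str.startswith line "!") then true
  else if (["##", "#$#", "#@#", "#%#", "#?#", "||"].any (fun x => PySem.Str.isIn x line)) then true
  else if PySem.Str.isIn "http:" line || PySem.Str.isIn "https:" line then
    -- line.split('http')[0]: sep ≠ "" so split? = some, and split always yields ≥ 1 piece, so [0] never raises
    if !(PySem.Str.isIn " " (((PySem.Str.split? line "http").getD []).headD "")) then true
    else false
  else false

-- the block-processing part of A's loop body (phase is false afterwards)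
def pvBlockStep (header : List String) (blocks : List (String × List String))
    (pending : List String) (line stripped : String) :
    List String × List (String × List String) × List String × Bool :=
  if pvIsPayload line then
    (header, blocks ++ [(PySem.Str.lower stripped, pending ++ [line])], ([] : List String), false)
  else
    (header, blocks, pending ++ [line], false)

-- A's loop body over the state (header_lines, blocks, pending_comments, is_header_phase)
def pvStepA : List String × List (String × List String) × List String × Bool → String →
    List String × List (String × List String) × List String × Bool
  | (header, blocks, pending, phase), line =>
    let stripped := PySem.Str.strip line
    if stripped = "" then (header, blocks, pending, phase)
    else if phase then
      if PySem.Str.startswith stripped "!" then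
        if pvIsPayload line then pvBlockStep header blocks pending line stripped
        else (header ++ [line], blocks, pending, true)
      else pvBlockStep header blocks pending line stripped
    else pvBlockStep header blocks pending line stripped

-- A's dedupe loop body: unique_blocks + seen
def pvDedupA (p : List (String × List String) × PySem.Set (List String)) (b : String × List String) :
    List (String × List String) × PySem.Set (List String) :=
  if PySem.Set.contains p.2 b.2 then p else (p.1 ++ [b], PySem.Set.add p.2 b.2)

def robust_sort_py (lines : List String) : List String :=
  let st := lines.foldl pvStepA ([], [], [], true)
  let header := st.1
  let blocks := st.2.1
  let pending := st.2.2.1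
  let blocks := if pending ≠ [] then
      blocks ++ [(PySem.Str.lower (PySem.Str.strip (PySem.List.pyGetD pending 0 "")), pending)]
    else blocks
  let sorted_blocks := PySem.List.sorted blocks (fun x => x.1) false
  let res := sorted_blocks.foldl pvDedupA ([], PySem.Set.empty)
  res.1.foldl (fun acc b => acc ++ b.2) header

-- ===== PORT B =====
-- the while loop splitting off the leading header comments (nonblank[:k], nonblank[k:])
def pvHeaderSplit : List String → List String × List String
  | [] => ([], [])
  | l :: ls =>
    if PySem.Str.startswith (PySem.Str.strip l) "!" && !(pvIsPayload l) then
      let r := pvHeaderSplit ls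
      (l :: r.1, r.2)
    else ([], l :: ls)

-- one step of B's right-to-left scan over the body: state = (rev_chunks, cur)
def pvChunkStep (st : List (List String) × List String) (l : String) :
    List (List String) × List String :=
  if pvIsPayload l then (if st.2 = [] then st.1 else st.1 ++ [st.2], [l])
  else (st.1, st.2 ++ [l])

-- Source B's key(c): chunks are nonempty by construction, so getLastD ""/headD "" are c[-1]/c[0]
def pvKeyB (c : List String) : String :=
  let anchor := if pvIsPayload (c.getLastD "") then c.getLastD "" else c.headD ""
  PySem.Str.lower (PySem.Str.strip anchor)

def robust_sort_py_alt (lines : List String) : List String :=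
  let nonblank := lines.filter (fun l => PySem.Str.strip l != "")
  let hr := pvHeaderSplit nonblank
  let st := hr.2.reverse.foldl pvChunkStep ([], [])
  let revChunks := if st.2 = [] then st.1 else st.1 ++ [st.2]
  let chunks := revChunks.reverse.map List.reverse
  (PySem.List.sorted (PySem.List.dedup chunks) pvKeyB false).foldl (fun out c => out ++ c) hr.1

-- ===== PRECONDITION & SPEC =====
def Spec_robust_sort_py (lines : List String) (out : List String) : Prop := out = robust_sort_py_alt lines
instance (lines : List String) (out : List String) : Decidable (Spec_robust_sort_py lines out) := by unfold Spec_robust_sort_py; infer_instance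

-- ===== CLAIM (what is proved, stated in full; the proofs are below) =====
def Claim_equal_robust_sort_py : Prop := ∀ (lines : List String), Dom_robust_sort_py lines → Spec_robust_sort_py lines (robust_sort_py lines)

-- ===== LEMMAS AND PROOFS =====

-- proof-side helpers ------------------------------------------------------

-- A's block-processing loop body, as a fold over (blocks, pending)
def pvStepB (st : List (String × List String) × List String) (line : String) :
    List (String × List String) × List String :=
  if pvIsPayload line then
    (st.1 ++ [(PySem.Str.lower (PySem.Str.strip line), st.2 ++ [line])], ([] : List String))
  else (st.1, st.2 ++ [line])

-- A's dedupe, fused with the final concatenation (emission form)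
def pvDedupB (st : List String × PySem.Set (List String)) (b : String × List String) :
    List String × PySem.Set (List String) :=
  if PySem.Set.contains st.2 b.2 then st else (st.1 ++ b.2, PySem.Set.add st.2 b.2)

-- forward structural characterisation of B's right-to-left chunking
def pvChunksF : List String → List (List String)
  | [] => []
  | l :: ls =>
    if pvIsPayload l then [l] :: pvChunksF ls
    else match pvChunksF ls with
      | [] => [[l]]
      | c :: cs => (l :: c) :: cs

-- dedup (keep first occurrence) relative to an already-seen set
def pvDedupFrom (s : PySem.Set (List String)) : List (List String) → List (List String)
  | [] => []
  | c :: t => if PySem.Set.contains s c then pvDedupFrom s t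
              else c :: pvDedupFrom (PySem.Set.add s c) t

-- small facts -------------------------------------------------------------

lemma pvContains_add (s : PySem.Set (List String)) (a c : List String) :
    PySem.Set.contains (PySem.Set.add s a) c = (PySem.Set.contains s c || c == a) := by
  simp only [PySem.Set.add]
  by_cases h : PySem.Set.contains s a = true
  · rw [if_pos h]
    by_cases hca : c = a
    · subst hca; rw [h]; simp
    · simp [hca]
  · rw [if_neg h]
    by_cases hca : c = a
    · subst hca; simp [PySem.Set.contains]
    · simp [PySem.Set.contains, hca]

lemma pvNotContains {s : PySem.Set (List String)} {x : List String}
    (hs : PySem.Set.contains s x = false) : ¬ (PySem.Set.contains s x = true) := by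
  rw [hs]; simp

lemma pvGetLastD_mem (l : List String) (h : l ≠ []) : l.getLastD "" ∈ l := by
  rw [List.getLastD_eq_getLast?, List.getLast?_eq_some_getLast h]
  exact List.getLast_mem _

-- A: blank lines leave A's state unchanged, so folding over the filtered list is the same
lemma pvStepA_filter : ∀ (lines : List String) (st : List String × List (String × List String) × List String × Bool),
    (lines.filter (fun l => PySem.Str.strip l != "")).foldl pvStepA st = lines.foldl pvStepA st := by
  intro lines
  induction lines with
  | nil => intro st; rfl
  | cons l ls ih =>
    intro st
    by_cases h : PySem.Str.strip l = ""
    · obtain ⟨header, blocks, pending, phase⟩ := st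
      simp [h, ih, pvStepA]
    · simp [h, ih]

-- A: once the phase flag is false, A's loop is the (blocks, pending) fold pvStepB
lemma pvPhaseFalse : ∀ (l : List String) (header : List String)
    (blocks : List (String × List String)) (pending : List String),
    (∀ x ∈ l, PySem.Str.strip x ≠ "") →
    l.foldl pvStepA (header, blocks, pending, false) =
      (header, (l.foldl pvStepB (blocks, pending)).1, (l.foldl pvStepB (blocks, pending)).2, false) := by
  intro l
  induction l with
  | nil => intro header blocks pending _; rfl
  | cons x ls ih =>
    intro header blocks pending hnb
    have hx : PySem.Str.strip x ≠ "" := hnb x (by simp)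
    have hls : ∀ y ∈ ls, PySem.Str.strip y ≠ "" := fun y hy => hnb y (by simp [hy])
    by_cases hp : pvIsPayload x
    · simp [pvStepA, hx, pvBlockStep, hp, pvStepB, ih _ _ _ hls]
    · simp [pvStepA, hx, pvBlockStep, hp, pvStepB, ih _ _ _ hls]

-- A: the fold starting in the header phase = header split followed by the pvStepB fold
lemma pvPhaseTrue : ∀ (l : List String) (header : List String)
    (blocks : List (String × List String)) (pending : List String),
    (∀ x ∈ l, PySem.Str.strip x ≠ "") →
    l.foldl pvStepA (header, blocks, pending, true) =
      (header ++ (pvHeaderSplit l).1,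
       ((pvHeaderSplit l).2.foldl pvStepB (blocks, pending)).1,
       ((pvHeaderSplit l).2.foldl pvStepB (blocks, pending)).2,
       if (pvHeaderSplit l).2 = [] then true else false) := by
  intro l
  induction l with
  | nil => intro header blocks pending _; simp [pvHeaderSplit]
  | cons x ls ih =>
    intro header blocks pending hnb
    have hx : PySem.Str.strip x ≠ "" := hnb x (by simp)
    have hls : ∀ y ∈ ls, PySem.Str.strip y ≠ "" := fun y hy => hnb y (by simp [hy])
    by_cases hs : PySem.Str.startswith (PySem.Str.strip x) "!" = true
    · have hs' : PySem.Chars.startswith (PySem.Chars.strip x.toList) ['!'] = true := by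
        simpa using hs
      by_cases hp : pvIsPayload x
      · simp only [pvHeaderSplit, hs, hp, Bool.not_true, Bool.and_false, Bool.false_eq_true,
          if_false, List.foldl_cons]
        have : pvStepA (header, blocks, pending, true) x = pvBlockStep header blocks pending x (PySem.Str.strip x) := by
          simp [pvStepA, hx, hp]
        rw [this]
        by_cases hp2 : pvIsPayload x
        · simp [pvBlockStep, hp2, pvStepB, pvPhaseFalse ls _ _ _ hls]
        · exact absurd hp hp2
      · have : pvStepA (header, blocks, pending, true) x = (header ++ [x], blocks, pending, true) := by
          simp [pvStepA, hx, hs', hp]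
        simp only [pvHeaderSplit, hs, hp, Bool.not_false, Bool.and_true, if_true, List.foldl_cons, this,
          ih _ _ _ hls]
        simp
    · have hs' : PySem.Chars.startswith (PySem.Chars.strip x.toList) ['!'] = false := by
        simpa using hs
      simp only [pvHeaderSplit, hs, Bool.false_and, Bool.false_eq_true, if_false, List.foldl_cons]
      have : pvStepA (header, blocks, pending, true) x = pvBlockStep header blocks pending x (PySem.Str.strip x) := by
        simp [pvStepA, hx, hs']
      rw [this]
      by_cases hp : pvIsPayload x
      · simp [pvBlockStep, hp, pvStepB, pvPhaseFalse ls _ _ _ hls]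
      · simp [pvBlockStep, hp, pvStepB, pvPhaseFalse ls _ _ _ hls]

-- A: build-unique-list-then-concatenate = direct emission (pvDedupB)
lemma pvDedup_eq : ∀ (sb u : List (String × List String)) (seen : PySem.Set (List String)) (h : List String),
    ((sb.foldl pvDedupA (u, seen)).1).foldl (fun acc b => acc ++ b.2) h
      = (sb.foldl pvDedupB (u.foldl (fun acc b => acc ++ b.2) h, seen)).1 := by
  intro sb
  induction sb with
  | nil => intro u seen h; rfl
  | cons b bs ih =>
    intro u seen h
    simp only [List.foldl_cons, pvDedupA, pvDedupB]
    by_cases hc : PySem.Set.contains seen b.2 = true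
    · rw [if_pos hc, if_pos hc, ih]
    · rw [if_neg hc, if_neg hc, ih (u ++ [b]), List.foldl_append]
      rfl

-- the pvStepB fold only appends to the blocks component
lemma pvStepB_blocks : ∀ (ls : List String) (b1 b2 : List (String × List String)) (pending : List String),
    ls.foldl pvStepB (b1 ++ b2, pending)
      = (b1 ++ (ls.foldl pvStepB (b2, pending)).1, (ls.foldl pvStepB (b2, pending)).2) := by
  intro ls
  induction ls with
  | nil => intro b1 b2 pending; simp
  | cons l ls ih =>
    intro b1 b2 pending
    by_cases hp : pvIsPayload l
    · simp only [List.foldl_cons, pvStepB, hp, if_true, List.append_assoc]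
      exact ih b1 _ []
    · simp only [List.foldl_cons, pvStepB, hp, Bool.false_eq_true, if_false]
      exact ih b1 b2 _

-- prepending all-comment lines attaches them to the first chunk
lemma pvChunksF_app : ∀ (p ls : List String), (∀ x ∈ p, pvIsPayload x = false) →
    pvChunksF (p ++ ls) = match pvChunksF ls with
      | [] => (if p = [] then [] else [p])
      | c :: cs => (p ++ c) :: cs := by
  intro p
  induction p with
  | nil =>
    intro ls _
    cases h : pvChunksF ls <;> simp [h]
  | cons x p' ih =>
    intro ls hp
    have hx : pvIsPayload x = false := hp x (by simp)
    have hp' : ∀ y ∈ p', pvIsPayload y = false := fun y hy => hp y (by simp [hy])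
    have heq : (x :: p') ++ ls = x :: (p' ++ ls) := by simp
    rw [heq]
    simp only [pvChunksF, hx, Bool.false_eq_true, if_false]
    rw [ih ls hp']
    cases h : pvChunksF ls with
    | nil =>
      by_cases hp'' : p' = []
      · subst hp''; simp
      · simp [hp'']
    | cons c cs => simp

-- the A-side blocks list (with the trailing-comment block) is the chunk list paired with B's keys
lemma pvBlocks_eq : ∀ (ls pending : List String), (∀ x ∈ pending, pvIsPayload x = false) →
    (if (ls.foldl pvStepB ([], pending)).2 ≠ [] then
       (ls.foldl pvStepB ([], pending)).1
         ++ [(PySem.Str.lower (PySem.Str.strip (PySem.List.pyGetD (ls.foldl pvStepB ([], pending)).2 0 "")),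
              (ls.foldl pvStepB ([], pending)).2)]
     else (ls.foldl pvStepB ([], pending)).1)
    = (pvChunksF (pending ++ ls)).map (fun c => (pvKeyB c, c)) := by
  intro ls
  induction ls with
  | nil =>
    intro pending hp
    simp only [List.foldl_nil]
    rw [pvChunksF_app pending [] hp]
    cases pending with
    | nil => simp [pvChunksF]
    | cons a rest =>
      simp only [pvChunksF, ne_eq, reduceCtorEq, not_false_eq_true, if_true]
      have hlast : (a :: rest).getLastD "" ∈ (a :: rest) := pvGetLastD_mem _ (by simp)
      have hfalse := hp _ hlast
      rw [List.getLastD_eq_getLast?] at hfalse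
      have hkey : pvKeyB (a :: rest) = PySem.Str.lower (PySem.Str.strip a) := by
        simp [pvKeyB, hfalse]
      simp [hkey, pysem]
  | cons l ls' ih =>
    intro pending hp
    by_cases hpl : pvIsPayload l
    · simp only [List.foldl_cons, pvStepB, hpl, if_true]
      rw [show ([] : List (String × List String)) ++ [(PySem.Str.lower (PySem.Str.strip l), pending ++ [l])]
            = [(PySem.Str.lower (PySem.Str.strip l), pending ++ [l])] ++ [] by simp,
        pvStepB_blocks ls' [(PySem.Str.lower (PySem.Str.strip l), pending ++ [l])] [] []]
      have hkey : pvKeyB (pending ++ [l]) = PySem.Str.lower (PySem.Str.strip l) := by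
        simp [pvKeyB, hpl]
      have hchunks : pvChunksF (pending ++ l :: ls') = (pending ++ [l]) :: pvChunksF ls' := by
        rw [show pending ++ l :: ls' = pending ++ ([l] ++ ls') by simp,
          pvChunksF_app pending ([l] ++ ls') hp]
        simp [pvChunksF, hpl]
      rw [hchunks]
      have ihe := ih [] (by intro x hx; simp at hx)
      simp only [List.nil_append] at ihe
      simp only [List.map_cons, hkey]
      by_cases hx2 : (ls'.foldl pvStepB ([], [])).2 = []
      · simp only [hx2, ne_eq, not_true_eq_false, if_false] at ihe ⊢
        rw [← ihe]
        simp
      · simp only [hx2, ne_eq, not_false_eq_true, if_true] at ihe ⊢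
        rw [← ihe]
        simp
    · simp only [List.foldl_cons, pvStepB, hpl, Bool.false_eq_true, if_false]
      rw [show pending ++ l :: ls' = (pending ++ [l]) ++ ls' by simp]
      exact ih (pending ++ [l]) (by
        intro x hx
        rcases List.mem_append.mp hx with h | h
        · exact hp x h
        · simp at h; subst h; simpa using hpl)

-- B's right-to-left scan computes pvChunksF
lemma pvChunkState : ∀ (ls : List String),
    ((ls.reverse.foldl pvChunkStep ([], [])).2 = [] → (ls.reverse.foldl pvChunkStep ([], [])).1 = []) ∧
    ((if (ls.reverse.foldl pvChunkStep ([], [])).2 = []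
        then (ls.reverse.foldl pvChunkStep ([], [])).1
        else (ls.reverse.foldl pvChunkStep ([], [])).1
          ++ [(ls.reverse.foldl pvChunkStep ([], [])).2]).reverse.map List.reverse = pvChunksF ls) := by
  intro ls
  induction ls with
  | nil => exact ⟨fun _ => rfl, rfl⟩
  | cons l ls ih =>
    obtain ⟨hinv, hfin⟩ := ih
    rw [List.reverse_cons, List.foldl_append, List.foldl_cons, List.foldl_nil]
    set st := ls.reverse.foldl pvChunkStep ([], []) with hst
    by_cases hpl : pvIsPayload l
    · have hstep : pvChunkStep st l = (if st.2 = [] then st.1 else st.1 ++ [st.2], [l]) := by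
        simp [pvChunkStep, hpl]
      rw [hstep]
      refine ⟨by intro h; simp at h, ?_⟩
      rw [if_neg (by simp)]
      have hch : pvChunksF (l :: ls) = [l] :: pvChunksF ls := by simp [pvChunksF, hpl]
      rw [hch, ← hfin]
      simp [List.reverse_append]
    · have hstep : pvChunkStep st l = (st.1, st.2 ++ [l]) := by simp [pvChunkStep, hpl]
      rw [hstep]
      refine ⟨by intro h; simp at h, ?_⟩
      rw [if_neg (by simp)]
      by_cases h2 : st.2 = []
      · have h1 := hinv h2
        rw [if_pos h2, h1] at hfin
        simp only [List.reverse_nil, List.map_nil] at hfin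
        have hch : pvChunksF (l :: ls) = [[l]] := by
          simp [pvChunksF, hpl, ← hfin]
        rw [hch, h1, h2]
        simp
      · rw [if_neg h2] at hfin
        rw [List.reverse_append] at hfin
        simp only [List.reverse_cons, List.reverse_nil, List.nil_append] at hfin
        have hch : pvChunksF (l :: ls) = (l :: st.2.reverse) :: (st.1.reverse.map List.reverse) := by
          simp [pvChunksF, hpl, ← hfin]
        rw [hch, List.reverse_append]
        simp

-- sorting the (key, chunk) pairs by fst = pairing up the chunks sorted by the key
lemma pvInsertBy_map (x : List String) : ∀ (acc : List (List String)),
    PySem.List.insertBy (fun a b => decide (a.1 < b.1)) (pvKeyB x, x)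
        (acc.map (fun c => (pvKeyB c, c)))
      = (PySem.List.insertBy (fun a b => decide (pvKeyB a < pvKeyB b)) x acc).map
          (fun c => (pvKeyB c, c)) := by
  intro acc
  induction acc with
  | nil => rfl
  | cons y ys ih =>
    simp only [List.map_cons, PySem.List.insertBy]
    by_cases h : decide (pvKeyB x < pvKeyB y) = true
    · rw [if_pos h, if_pos h]
      simp
    · rw [if_neg h, if_neg h, ih]
      simp

lemma pvSorted_map (cs : List (List String)) :
    PySem.List.sorted (cs.map (fun c => (pvKeyB c, c))) (fun x => x.1) false
      = (PySem.List.sorted cs pvKeyB false).map (fun c => (pvKeyB c, c)) := by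
  rw [PySem.List.sorted_eq_foldl_insertBy, PySem.List.sorted_eq_foldl_insertBy, List.foldl_map]
  suffices h : ∀ (acc : List (List String)),
      cs.foldl (fun a x => PySem.List.insertBy (fun a b => decide (a.1 < b.1)) (pvKeyB x, x) a)
          (acc.map (fun c => (pvKeyB c, c)))
        = (cs.foldl (fun a x => PySem.List.insertBy (fun a b => decide (pvKeyB a < pvKeyB b)) x a) acc).map
            (fun c => (pvKeyB c, c)) by
    simpa using h []
  induction cs with
  | nil => intro acc; rfl
  | cons x xs ih =>
    intro acc
    simp only [List.foldl_cons]
    rw [pvInsertBy_map, ih]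

-- dedup-from with indistinguishable seen sets agree
lemma pvDedupFrom_congr : ∀ (t : List (List String)) (s₁ s₂ : PySem.Set (List String)),
    (∀ c ∈ t, PySem.Set.contains s₁ c = PySem.Set.contains s₂ c) →
    pvDedupFrom s₁ t = pvDedupFrom s₂ t := by
  intro t
  induction t with
  | nil => intro _ _ _; rfl
  | cons c t ih =>
    intro s₁ s₂ h
    have hc := h c (by simp)
    simp only [pvDedupFrom, hc]
    by_cases hs : PySem.Set.contains s₂ c = true
    · rw [if_pos hs, if_pos hs]
      exact ih _ _ (fun d hd => h d (by simp [hd]))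
    · rw [if_neg hs, if_neg hs]
      congr 1
      apply ih
      intro d hd
      rw [pvContains_add, pvContains_add, h d (by simp [hd])]

lemma pvMem_dedupFrom : ∀ (t : List (List String)) (s : PySem.Set (List String)) (c : List String),
    c ∈ pvDedupFrom s t → c ∈ t := by
  intro t
  induction t with
  | nil => intro s c h; simp [pvDedupFrom] at h
  | cons a t ih =>
    intro s c h
    simp only [pvDedupFrom] at h
    by_cases hs : PySem.Set.contains s a = true
    · rw [if_pos hs] at h
      exact List.mem_cons_of_mem _ (ih _ _ h)
    · rw [if_neg hs] at h
      rcases List.mem_cons.mp h with h | h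
      · simp [h]
      · exact List.mem_cons_of_mem _ (ih _ _ h)

-- inserting an already-seen element is invisible to pvDedupFrom (on a key-sorted list)
lemma pvDedupFrom_insert_seen : ∀ (t : List (List String)) (s : PySem.Set (List String)) (x : List String),
    (PySem.Set.contains s x = true ∨ x ∈ t) →
    t.Pairwise (fun a b => pvKeyB a ≤ pvKeyB b) →
    pvDedupFrom s (PySem.List.insertBy (fun a b => decide (pvKeyB a < pvKeyB b)) x t)
      = pvDedupFrom s t := by
  intro t
  induction t with
  | nil =>
    intro s x h _
    rcases h with h | h
    · show pvDedupFrom s (PySem.List.insertBy _ x []) = pvDedupFrom s []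
      have hins : PySem.List.insertBy (fun a b => decide (pvKeyB a < pvKeyB b)) x ([] : List (List String)) = [x] := rfl
      rw [hins]
      simp only [pvDedupFrom]
      rw [if_pos h]
    · simp at h
  | cons y ys ih =>
    intro s x h hsort
    have hy_le : ∀ z ∈ ys, pvKeyB y ≤ pvKeyB z := (List.pairwise_cons.mp hsort).1
    have htail := (List.pairwise_cons.mp hsort).2
    simp only [PySem.List.insertBy]
    by_cases hlt : decide (pvKeyB x < pvKeyB y) = true
    · have hxlt : pvKeyB x < pvKeyB y := of_decide_eq_true hlt
      have hs : PySem.Set.contains s x = true := by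
        rcases h with h | h
        · exact h
        · rcases List.mem_cons.mp h with h | h
          · subst h; exact absurd hxlt (lt_irrefl _)
          · exact absurd hxlt (not_lt.mpr (hy_le x h))
      rw [if_pos hlt]
      simp only [pvDedupFrom]
      rw [if_pos hs]
    · rw [if_neg hlt]
      simp only [pvDedupFrom]
      by_cases hsy : PySem.Set.contains s y = true
      · rw [if_pos hsy, if_pos hsy]
        apply ih _ _ _ htail
        rcases h with h | h
        · exact Or.inl h
        · rcases List.mem_cons.mp h with h | h
          · subst h; exact Or.inl hsy
          · exact Or.inr h
      · rw [if_neg hsy, if_neg hsy]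
        congr 1
        apply ih _ _ _ htail
        rcases h with h | h
        · left; rw [pvContains_add, h]; simp
        · rcases List.mem_cons.mp h with h | h
          · subst h; left; rw [pvContains_add]; simp
          · exact Or.inr h

-- inserting a fresh element commutes with pvDedupFrom (on a key-sorted list)
lemma pvDedupFrom_insert_new : ∀ (t : List (List String)) (s : PySem.Set (List String)) (x : List String),
    PySem.Set.contains s x = false → x ∉ t →
    t.Pairwise (fun a b => pvKeyB a ≤ pvKeyB b) →
    pvDedupFrom s (PySem.List.insertBy (fun a b => decide (pvKeyB a < pvKeyB b)) x t)
      = PySem.List.insertBy (fun a b => decide (pvKeyB a < pvKeyB b)) x (pvDedupFrom s t) := by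
  intro t
  induction t with
  | nil =>
    intro s x hs _ _
    have hins : PySem.List.insertBy (fun a b => decide (pvKeyB a < pvKeyB b)) x ([] : List (List String)) = [x] := rfl
    show pvDedupFrom s (PySem.List.insertBy _ x []) = PySem.List.insertBy _ x (pvDedupFrom s [])
    rw [hins]
    simp only [pvDedupFrom]
    rw [if_neg (pvNotContains hs)]
    exact hins.symm
  | cons y ys ih =>
    intro s x hs hx hsort
    have hy_le : ∀ z ∈ ys, pvKeyB y ≤ pvKeyB z := (List.pairwise_cons.mp hsort).1
    have htail := (List.pairwise_cons.mp hsort).2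
    have hxy : x ≠ y := fun h => hx (by simp [h])
    have hxys : x ∉ ys := fun h => hx (by simp [h])
    simp only [PySem.List.insertBy]
    by_cases hlt : decide (pvKeyB x < pvKeyB y) = true
    · have hxlt : pvKeyB x < pvKeyB y := of_decide_eq_true hlt
      rw [if_pos hlt]
      have hunfold : pvDedupFrom s (x :: y :: ys)
          = x :: pvDedupFrom (PySem.Set.add s x) (y :: ys) := by
        simp only [pvDedupFrom]
        rw [if_neg (pvNotContains hs)]
      rw [hunfold]
      have hcong : pvDedupFrom (PySem.Set.add s x) (y :: ys) = pvDedupFrom s (y :: ys) := by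
        apply pvDedupFrom_congr
        intro c hc
        rw [pvContains_add]
        have hne : (c == x) = false := by
          simp only [beq_eq_false_iff_ne, ne_eq]
          intro hcx
          subst hcx
          exact hx hc
        rw [hne]
        simp
      rw [hcong]
      cases hd : pvDedupFrom s (y :: ys) with
      | nil => rfl
      | cons z zs =>
        have hz : z ∈ y :: ys := pvMem_dedupFrom _ _ _ (by rw [hd]; simp)
        have hzk : pvKeyB y ≤ pvKeyB z := by
          rcases List.mem_cons.mp hz with h | h
          · subst h; exact le_refl _
          · exact hy_le z h
        have hltz : decide (pvKeyB x < pvKeyB z) = true := decide_eq_true (lt_of_lt_of_le hxlt hzk)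
        simp only [PySem.List.insertBy]
        rw [if_pos hltz]
    · rw [if_neg hlt]
      simp only [pvDedupFrom]
      by_cases hsy : PySem.Set.contains s y = true
      · rw [if_pos hsy, if_pos hsy]
        exact ih _ _ hs hxys htail
      · rw [if_neg hsy, if_neg hsy]
        have hsx' : PySem.Set.contains (PySem.Set.add s y) x = false := by
          rw [pvContains_add, hs]
          simp only [Bool.false_or, beq_eq_false_iff_ne, ne_eq]
          exact hxy
        rw [ih _ _ hsx' hxys htail]
        simp only [PySem.List.insertBy]
        rw [if_neg hlt]

-- appending one element to the input of pvDedupFrom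
lemma pvDedupFrom_append : ∀ (cs : List (List String)) (s : PySem.Set (List String)) (x : List String),
    pvDedupFrom s (cs ++ [x])
      = pvDedupFrom s cs ++ (if PySem.Set.contains s x = true ∨ x ∈ cs then [] else [x]) := by
  intro cs
  induction cs with
  | nil =>
    intro s x
    simp only [List.nil_append, pvDedupFrom, List.not_mem_nil, or_false]
  | cons c cs ih =>
    intro s x
    simp only [List.cons_append, pvDedupFrom]
    by_cases hc : PySem.Set.contains s c = true
    · rw [if_pos hc, if_pos hc, ih]
      by_cases hx : x = c
      · subst hx
        have hiff : (PySem.Set.contains s x = true ∨ x ∈ x :: cs) ↔ (PySem.Set.contains s x = true ∨ x ∈ cs) := by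
          constructor
          · rintro (h | _)
            · exact Or.inl h
            · exact Or.inl hc
          · rintro (h | h)
            · exact Or.inl h
            · exact Or.inr (List.mem_cons_of_mem _ h)
        rw [if_congr hiff rfl rfl]
      · have hiff : (PySem.Set.contains s x = true ∨ x ∈ c :: cs) ↔ (PySem.Set.contains s x = true ∨ x ∈ cs) := by
          simp [hx]
        rw [if_congr hiff rfl rfl]
    · rw [if_neg hc, if_neg hc, ih]
      have hiff : (PySem.Set.contains (PySem.Set.add s c) x = true ∨ x ∈ cs)
           ↔ (PySem.Set.contains s x = true ∨ x ∈ c :: cs) := by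
        rw [pvContains_add]
        constructor
        · rintro (h | h)
          · by_cases hcx : x = c
            · subst hcx
              right; simp
            · left
              have hbe : (x == c) = false := by
                simp only [beq_eq_false_iff_ne, ne_eq]; exact hcx
              rw [hbe] at h
              simpa using h
          · exact Or.inr (List.mem_cons_of_mem _ h)
        · rintro (h | h)
          · left; rw [h]; simp
          · rcases List.mem_cons.mp h with h | h
            · subst h; left; simp
            · exact Or.inr h
      rw [if_congr hiff rfl rfl]
      simp

-- THE key lemma: a stable sort commutes with first-occurrence dedup
lemma pvDedup_sorted_comm : ∀ (cs : List (List String)) (s : PySem.Set (List String)),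
    pvDedupFrom s (PySem.List.sorted cs pvKeyB false)
      = PySem.List.sorted (pvDedupFrom s cs) pvKeyB false := by
  intro cs
  induction cs using List.reverseRecOn with
  | nil => intro s; rfl
  | append_singleton cs x ih =>
    intro s
    have hsort : PySem.List.sorted (cs ++ [x]) pvKeyB false
        = PySem.List.insertBy (fun a b => decide (pvKeyB a < pvKeyB b)) x
            (PySem.List.sorted cs pvKeyB false) := by
      rw [PySem.List.sorted_eq_foldl_insertBy, PySem.List.sorted_eq_foldl_insertBy, List.foldl_append]
      rfl
    rw [hsort, pvDedupFrom_append]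
    have hpair : (PySem.List.sorted cs pvKeyB false).Pairwise (fun a b => pvKeyB a ≤ pvKeyB b) :=
      PySem.List.sorted_pairwise cs pvKeyB
    by_cases h : PySem.Set.contains s x = true ∨ x ∈ cs
    · have h' : PySem.Set.contains s x = true ∨ x ∈ PySem.List.sorted cs pvKeyB false := by
        rcases h with h | h
        · exact Or.inl h
        · exact Or.inr ((PySem.List.mem_sorted _ _ _ _).mpr h)
      rw [if_pos h, pvDedupFrom_insert_seen _ _ _ h' hpair, ih]
      simp
    · have h1 : ¬ PySem.Set.contains s x = true := fun hc => h (Or.inl hc)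
      have h2 : x ∉ cs := fun hm => h (Or.inr hm)
      have hs : PySem.Set.contains s x = false := by
        cases hb : PySem.Set.contains s x
        · rfl
        · exact absurd hb h1
      have hxmem : x ∉ PySem.List.sorted cs pvKeyB false :=
        fun hm => h2 ((PySem.List.mem_sorted _ _ _ _).mp hm)
      rw [if_neg h]
      rw [pvDedupFrom_insert_new _ _ _ hs hxmem hpair, ih]
      rw [PySem.List.sorted_eq_foldl_insertBy, PySem.List.sorted_eq_foldl_insertBy, List.foldl_append]
      rfl

-- PySem.List.dedup is pvDedupFrom from the empty seen set
lemma pvOfList_acc : ∀ (t : List (List String)) (s : PySem.Set (List String)),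
    List.foldl PySem.Set.add s t = s ++ pvDedupFrom s t := by
  intro t
  induction t with
  | nil => intro s; simp [pvDedupFrom]
  | cons c t ih =>
    intro s
    simp only [List.foldl_cons, pvDedupFrom]
    by_cases hc : PySem.Set.contains s c = true
    · rw [if_pos hc]
      have hadd : PySem.Set.add s c = s := by
        simp only [PySem.Set.add]
        rw [if_pos hc]
      rw [hadd, ih]
    · rw [if_neg hc]
      have hadd : PySem.Set.add s c = s ++ [c] := by
        simp only [PySem.Set.add]
        rw [if_neg hc]
      rw [hadd, ih]
      simp

lemma pvDedup_eq_dedupFrom (t : List (List String)) :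
    PySem.List.dedup t = pvDedupFrom PySem.Set.empty t := by
  have h := pvOfList_acc t PySem.Set.empty
  simpa [PySem.List.dedup, PySem.Set.ofList, PySem.Set.empty] using h

-- the emission fold over paired blocks = append-fold over the deduped chunks
lemma pvEmit_eq : ∀ (t : List (List String)) (h : List String) (s : PySem.Set (List String)),
    (t.foldl (fun st c => pvDedupB st (pvKeyB c, c)) (h, s)).1
      = (pvDedupFrom s t).foldl (fun acc c => acc ++ c) h := by
  intro t
  induction t with
  | nil => intro h s; rfl
  | cons c t ih =>
    intro h s
    simp only [List.foldl_cons, pvDedupB, pvDedupFrom]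
    by_cases hc : PySem.Set.contains s c = true
    · rw [if_pos hc, if_pos hc]
      exact ih h s
    · rw [if_neg hc, if_neg hc]
      exact ih (h ++ c) (PySem.Set.add s c)

-- ===== VERDICT (by name: the statement is the Claim_ definition above) =====
theorem robust_sort_py_spec : Claim_equal_robust_sort_py := by
  intro lines _
  unfold Spec_robust_sort_py robust_sort_py robust_sort_py_alt
  rw [← pvStepA_filter]
  have hnb : ∀ x ∈ lines.filter (fun l => PySem.Str.strip l != ""), PySem.Str.strip x ≠ "" := by
    intro x hx
    simp only [List.mem_filter, bne_iff_ne, ne_eq] at hx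
    exact hx.2
  rw [pvPhaseTrue _ [] [] [] hnb]
  simp only [List.nil_append]
  rw [pvBlocks_eq _ [] (by intro x hx; simp at hx)]
  simp only [List.nil_append]
  rw [pvSorted_map, pvDedup_eq, List.foldl_nil, List.foldl_map, pvEmit_eq,
    pvDedup_sorted_comm, (pvChunkState _).2, pvDedup_eq_dedupFrom]
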